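-- pv_equiv track=rewrite | github.com/yohan9612/programmers_coding_test | Level1/prep_test.py | solution
-- ===== SOURCE A (Python) =====
-- def solution(answers):
--
--     no1 = []
--     no2 = []
--     no3 = []
--     count1 = 0
--     count2 = 0
--     count3 = 0
--
--     # answers 길이만큼 수포자 1,2,3번의 정답 배열 생성
--
--     for i in range(len(answers)):
--
--         if i % 5 == 1:
--             no1.append(2)
--         elif i % 5 == 2:
--             no1.append(3)
--         elif i % 5 == 3:
--             no1.append(4)
--         elif i % 5 == 4:
--             no1.append(5)
--         else:
--             no1.append(1)
--
--         if i % 2 == 0: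
--             no2.append(2)
--         else:
--             if i % 8 == 1:
--                 no2.append(1)
--             elif i % 8 == 3:
--                 no2.append(3)
--             elif i % 8 == 5:
--                 no2.append(4)
--             elif i % 8 == 7:
--                 no2.append(5)
--
--         if i % 10 == 0 or i % 10 == 1:
--             no3.append(3)
--         elif i % 10 == 2 or i % 10 == 3:
--             no3.append(1)
--         elif i % 10 == 4 or i % 10 == 5:
--             no3.append(2)
--         elif i % 10 == 6 or i % 10 == 7:
--             no3.append(4)
--         else:
--             no3.append(5)
--
--     # answers와 1,2,3번의 정답 비교하며 맞은 문제 수 count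
--
--     for i in range(len(answers)):
--         if answers[i] == no1[i]:
--             count1 += 1
--         if answers[i] == no2[i]:
--             count2 += 1
--         if answers[i] == no3[i]:
--             count3 += 1
--
--     # 맞은 문제 수 비교
--
--     if count1 > count2 and count1 > count3:
--         answer = [1]
--     elif count2 > count1 and count2 > count3:
--         answer = [2]
--     elif count3 > count1 and count3 > count2:
--         answer = [3]
--     elif count1 == count2:
--         if count1 > count3:
--             answer = [1,2]
--         else:
--             answer = [1,2,3]
--     elif count1 == count3:
--         if count1 > count2:
--             answer = [1,3]
--         else:
--             answer = [1,2,3]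
--     elif count2 == count3:
--         if count2 > count1:
--             answer = [2,3]
--         else:
--             answer = [1,2,3]
--     else:
--         answer = [1,2,3]
--
--     return answer
-- ===== SOURCE B (Python) =====
-- def solution(answers):
--     # Histogram approach: one pass buckets answers by (position mod 40, value);
--     # each student's score is then a 40-term table sum, independent of n.
--     hist = {}
--     for i, a in enumerate(answers):
--         key = (i % 40, a)
--         hist[key] = hist.get(key, 0) + 1
--     patterns = [[1, 2, 3, 4, 5], [2, 1, 2, 3, 2, 4, 2, 5], [3, 3, 1, 1, 2, 2, 4, 4, 5, 5]]
--     scores = [sum(hist.get((r, p[r % len(p)]), 0) for r in range(40)) for p in patterns]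
--     m = max(scores)
--     return [k + 1 for k in range(3) if scores[k] == m]
-- ===== Notes on version B (the rewrite author's own statement) =====
-- stated objective: alternative
-- what changed: B replaces A's per-element comparison against three reconstructed full-length answer sheets and its seven-branch tie cascade by a histogram: one pass builds a counter keyed on (position mod 40, answer value), each student's score is a 40-term table sum over that counter, and winners are picked by a max-filter.
import Mathlib
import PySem

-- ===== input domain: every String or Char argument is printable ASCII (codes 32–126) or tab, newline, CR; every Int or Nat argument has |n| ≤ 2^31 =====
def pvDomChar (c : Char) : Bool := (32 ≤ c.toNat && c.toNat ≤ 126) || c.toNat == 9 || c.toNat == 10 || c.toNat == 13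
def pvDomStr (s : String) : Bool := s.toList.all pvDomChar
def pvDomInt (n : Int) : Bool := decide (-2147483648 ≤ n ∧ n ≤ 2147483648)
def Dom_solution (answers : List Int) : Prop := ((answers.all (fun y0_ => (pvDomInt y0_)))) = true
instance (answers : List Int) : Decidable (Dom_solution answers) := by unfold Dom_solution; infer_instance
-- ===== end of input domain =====

-- B replaces A's comparison against three reconstructed full-length answer sheets and its
-- tie-breaking cascade by a histogram keyed on (position mod 40, answer value): scores become
-- 40-term table sums over that counter and the winners are picked by a max-filter (alternative
-- algorithm of the same cost).

-- ===== PORT A =====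
def solution (answers : List Int) : List Int :=
  let n := answers.length
  let no1 : List Int := (List.range n).foldl (fun acc i =>
      if i % 5 = 1 then acc ++ [2]
      else if i % 5 = 2 then acc ++ [3]
      else if i % 5 = 3 then acc ++ [4]
      else if i % 5 = 4 then acc ++ [5]
      else acc ++ [1]) []
  let no2 : List Int := (List.range n).foldl (fun acc i =>
      if i % 2 = 0 then acc ++ [2]
      else if i % 8 = 1 then acc ++ [1]
      else if i % 8 = 3 then acc ++ [3]
      else if i % 8 = 5 then acc ++ [4]
      else if i % 8 = 7 then acc ++ [5]
      else acc) []
  let no3 : List Int := (List.range n).foldl (fun acc i =>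
      if i % 10 = 0 ∨ i % 10 = 1 then acc ++ [3]
      else if i % 10 = 2 ∨ i % 10 = 3 then acc ++ [1]
      else if i % 10 = 4 ∨ i % 10 = 5 then acc ++ [2]
      else if i % 10 = 6 ∨ i % 10 = 7 then acc ++ [4]
      else acc ++ [5]) []
  let c := (List.range n).foldl (fun (c : Int × Int × Int) i =>
      ( if answers.getD i 0 = no1.getD i 0 then c.1 + 1 else c.1,
        if answers.getD i 0 = no2.getD i 0 then c.2.1 + 1 else c.2.1,
        if answers.getD i 0 = no3.getD i 0 then c.2.2 + 1 else c.2.2)) (0, 0, 0)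
  let count1 := c.1
  let count2 := c.2.1
  let count3 := c.2.2
  if count1 > count2 ∧ count1 > count3 then [1]
  else if count2 > count1 ∧ count2 > count3 then [2]
  else if count3 > count1 ∧ count3 > count2 then [3]
  else if count1 = count2 then (if count1 > count3 then [1, 2] else [1, 2, 3])
  else if count1 = count3 then (if count1 > count2 then [1, 3] else [1, 2, 3])
  else if count2 = count3 then (if count2 > count1 then [2, 3] else [1, 2, 3])
  else [1, 2, 3]

-- ===== PORT B =====
def solution_alt (answers : List Int) : List Int :=
  let hist : PySem.Dict (Int × Int) Int :=
    (PySem.List.enumerate answers).foldl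
      (fun d ia =>
        let key : Int × Int := (PySem.Int.mod ia.1 40, ia.2)
        d.insert key (d.getD key 0 + 1))
      PySem.Dict.empty
  let patterns : List (List Int) :=
    [[1, 2, 3, 4, 5], [2, 1, 2, 3, 2, 4, 2, 5], [3, 3, 1, 1, 2, 2, 4, 4, 5, 5]]
  let scores : List Int := patterns.map (fun p =>
    ((PySem.List.pyRange 0 40 1).map
      (fun r => hist.getD (r, PySem.List.pyGetD p (PySem.Int.mod r (p.length : Int)) 0) 0)).sum)
  let m : Int := (PySem.List.max? scores (fun x => x)).getD 0
  (PySem.List.pyRange 0 3 1).foldl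
    (fun acc k => if PySem.List.pyGetD scores k 0 = m then acc ++ [k + 1] else acc) []

-- ===== PRECONDITION & SPEC =====
def Spec_solution (answers : List Int) (out : List Int) : Prop := out = solution_alt answers
instance (answers : List Int) (out : List Int) : Decidable (Spec_solution answers out) := by unfold Spec_solution; infer_instance

-- ===== CLAIM (what is proved, stated in full; the proofs are below) =====
def Claim_equal_solution : Prop := ∀ (answers : List Int), Dom_solution answers → Spec_solution answers (solution answers)

-- ===== LEMMAS AND PROOFS =====

-- the three fixed cyclic patterns (proof-side names)
def pat1 : List Int := [1, 2, 3, 4, 5]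
def pat2 : List Int := [2, 1, 2, 3, 2, 4, 2, 5]
def pat3 : List Int := [3, 3, 1, 1, 2, 2, 4, 4, 5, 5]

-- the common value both programs compute: the score of a pattern
def cnt (answers pat : List Int) : Nat :=
  (List.range answers.length).countP
    (fun i => answers.getD i 0 = pat.getD (i % pat.length) 0)

theorem no1_eq (n : Nat) :
    (List.range n).foldl (fun acc i =>
      if i % 5 = 1 then acc ++ [(2:Int)]
      else if i % 5 = 2 then acc ++ [3]
      else if i % 5 = 3 then acc ++ [4]
      else if i % 5 = 4 then acc ++ [5]
      else acc ++ [1]) [] = (List.range n).map (fun i => pat1.getD (i % 5) 0) := by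
  induction n with
  | zero => simp
  | succ n ih =>
    rw [List.range_succ, List.foldl_append, List.map_append, ih]
    simp only [List.foldl_cons, List.foldl_nil, List.map_cons, List.map_nil]
    have h5 : n % 5 < 5 := by omega
    set r := n % 5 with hr
    interval_cases r <;> norm_num [pat1]

theorem no2_eq (n : Nat) :
    (List.range n).foldl (fun acc i =>
      if i % 2 = 0 then acc ++ [(2:Int)]
      else if i % 8 = 1 then acc ++ [1]
      else if i % 8 = 3 then acc ++ [3]
      else if i % 8 = 5 then acc ++ [4]
      else if i % 8 = 7 then acc ++ [5]
      else acc) [] = (List.range n).map (fun i => pat2.getD (i % 8) 0) := by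
  induction n with
  | zero => simp
  | succ n ih =>
    rw [List.range_succ, List.foldl_append, List.map_append, ih]
    simp only [List.foldl_cons, List.foldl_nil, List.map_cons, List.map_nil]
    rw [show n % 2 = n % 8 % 2 from (Nat.mod_mod_of_dvd n (by norm_num)).symm]
    have h8 : n % 8 < 8 := by omega
    set r := n % 8 with hr
    interval_cases r <;> norm_num [pat2]

theorem no3_eq (n : Nat) :
    (List.range n).foldl (fun acc i =>
      if i % 10 = 0 ∨ i % 10 = 1 then acc ++ [(3:Int)]
      else if i % 10 = 2 ∨ i % 10 = 3 then acc ++ [1]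
      else if i % 10 = 4 ∨ i % 10 = 5 then acc ++ [2]
      else if i % 10 = 6 ∨ i % 10 = 7 then acc ++ [4]
      else acc ++ [5]) [] = (List.range n).map (fun i => pat3.getD (i % 10) 0) := by
  induction n with
  | zero => simp
  | succ n ih =>
    rw [List.range_succ, List.foldl_append, List.map_append, ih]
    simp only [List.foldl_cons, List.foldl_nil, List.map_cons, List.map_nil]
    have h10 : n % 10 < 10 := by omega
    set r := n % 10 with hr
    interval_cases r <;> norm_num [pat3]

theorem sum_indicator_range (N m : Nat) (c : Int) (hm : m < N) :
    ((List.range N).map (fun r => if r = m then c else 0)).sum = c := by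
  induction N with
  | zero => omega
  | succ N ih =>
    rw [List.range_succ, List.map_append, List.sum_append]
    by_cases h : m = N
    · subst h
      have : ((List.range m).map (fun r => if r = m then c else 0)).sum = 0 := by
        rw [List.sum_eq_zero]
        intro x hx
        simp only [List.mem_map, List.mem_range] at hx
        obtain ⟨r, hr, hx⟩ := hx
        simp [Nat.ne_of_lt hr] at hx
        omega
      simp [this]
    · have hm' : m < N := by omega
      rw [ih hm']
      simp [Ne.symm h]

theorem sum_count_eq_countP (L : List (Int × Int)) (g : Int → Int) (N : Nat)
    (h : ∀ kv ∈ L, ∃ m : Nat, m < N ∧ kv.1 = (m : Int)) :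
    ((List.range N).map (fun r => (L.count (((r : Nat) : Int), g ((r : Nat) : Int)) : Int))).sum
      = (L.countP (fun kv => kv.2 = g kv.1) : Int) := by
  induction L with
  | nil => simp
  | cons a L ih =>
    obtain ⟨m, hm, ha1⟩ := h a (List.mem_cons_self)
    have hL : ∀ kv ∈ L, ∃ m : Nat, m < N ∧ kv.1 = (m : Int) :=
      fun kv hkv => h kv (List.mem_cons_of_mem _ hkv)
    have hcount : ∀ r : Nat,
        ((a :: L).count (((r : Nat) : Int), g r) : Int)
          = (L.count (((r : Nat) : Int), g r) : Int) + (if r = m ∧ a.2 = g (m : Int) then 1 else 0) := by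
      intro r
      rw [List.count_cons]
      push_cast
      congr 1
      by_cases hrm : r = m
      · subst hrm
        by_cases h2 : a.2 = g (r : Int)
        · simp [ha1, h2, Prod.ext_iff]
        · simp [Prod.ext_iff, ha1, h2]
      · have : ((r : Int), g (r : Int)) ≠ a := by
          intro hx
          apply hrm
          have := congrArg Prod.fst hx
          simp [ha1] at this
          exact_mod_cast this
        simp [beq_iff_eq, this.symm, hrm]
    calc ((List.range N).map (fun r => ((a :: L).count (((r : Nat) : Int), g r) : Int))).sum
        = ((List.range N).map (fun r =>
            (L.count (((r : Nat) : Int), g r) : Int) + (if r = m ∧ a.2 = g (m : Int) then 1 else 0))).sum := by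
          exact congrArg List.sum (List.map_congr_left (fun r _ => hcount r))
      _ = ((List.range N).map (fun r => (L.count (((r : Nat) : Int), g r) : Int))).sum
            + ((List.range N).map (fun r => if r = m ∧ a.2 = g (m : Int) then (1:Int) else 0)).sum := by
          rw [← List.sum_map_add]
      _ = (L.countP (fun kv => kv.2 = g kv.1) : Int) + (if a.2 = g a.1 then 1 else 0) := by
          rw [ih hL]
          congr 1
          by_cases h2 : a.2 = g (m : Int)
          · rw [show (fun r => if r = m ∧ a.2 = g (m : Int) then (1:Int) else 0)
                 = (fun r => if r = m then (1:Int) else 0) from by funext r; simp [h2]]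
            rw [sum_indicator_range N m 1 hm]
            simp [ha1, h2]
          · rw [show (fun r => if r = m ∧ a.2 = g (m : Int) then (1:Int) else 0)
                 = (fun _ => (0:Int)) from by funext r; simp [h2]]
            simp [ha1, h2]
      _ = ((a :: L).countP (fun kv => kv.2 = g kv.1) : Int) := by
          rw [List.countP_cons]
          push_cast
          by_cases h2 : a.2 = g a.1 <;> simp [h2]

theorem getD_insert_key_loop {κ β : Type} [BEq κ] [LawfulBEq κ] (f : β → κ) (l : List β)
    (d : PySem.Dict κ Int) (v : κ) :
    (l.foldl (fun d x => d.insert (f x) (d.getD (f x) 0 + 1)) d).getD v 0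
      = d.getD v 0 + ((l.map f).count v : Int) := by
  induction l generalizing d with
  | nil => simp
  | cons a l ih =>
    simp only [List.foldl_cons, List.map_cons, List.count_cons]
    rw [ih]
    by_cases h : v = f a
    · subst h
      rw [PySem.Dict.getD_insert_self]
      push_cast
      simp
      ring
    · rw [PySem.Dict.getD_insert_of_ne _ _ _ h]
      have : ¬ (f a == v) = true := by simp [Ne.symm h]
      simp [this]

theorem score_eq (answers p : List Int) (hdvd : p.length ∣ 40) :
    ((PySem.List.pyRange 0 40 1).map
      (fun r => ((PySem.List.enumerate answers).foldl
          (fun d ia =>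
            d.insert (PySem.Int.mod ia.1 40, ia.2) (d.getD (PySem.Int.mod ia.1 40, ia.2) 0 + 1))
          PySem.Dict.empty).getD (r, PySem.List.pyGetD p (PySem.Int.mod r (p.length : Int)) 0) 0)).sum
    = (cnt answers p : Int) := by
  set L := (PySem.List.enumerate answers).map (fun ia => (PySem.Int.mod ia.1 40, ia.2)) with hLdef
  have hget : ∀ v : Int × Int,
      ((PySem.List.enumerate answers).foldl
          (fun d ia =>
            d.insert (PySem.Int.mod ia.1 40, ia.2) (d.getD (PySem.Int.mod ia.1 40, ia.2) 0 + 1))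
          PySem.Dict.empty).getD v 0 = (L.count v : Int) := by
    intro v
    have := getD_insert_key_loop (fun ia : Int × Int => (PySem.Int.mod ia.1 40, ia.2))
      (PySem.List.enumerate answers) PySem.Dict.empty v
    rw [hLdef]
    simpa [PySem.Dict.getD_empty] using this
  simp only [hget]
  have h40 : (40 : Int) = ((40 : Nat) : Int) := rfl
  rw [h40, PySem.List.pyRange_zero_natCast, List.map_map]
  have hmem : ∀ kv ∈ L, ∃ m : Nat, m < 40 ∧ kv.1 = (m : Int) := by
    intro kv hkv
    rw [hLdef] at hkv
    simp only [List.mem_map] at hkv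
    obtain ⟨ia, hia, rfl⟩ := hkv
    rw [PySem.List.mem_enumerate_iff] at hia
    obtain ⟨k, hk, rfl⟩ := hia
    refine ⟨k % 40, by omega, ?_⟩
    simp only [zero_add]
    rw [show ((k : Int)) = ((k : Nat) : Int) from rfl, show (40 : Int) = ((40 : Nat) : Int) from rfl,
        PySem.Int.mod_natCast]
  have := sum_count_eq_countP L (fun r => PySem.List.pyGetD p (PySem.Int.mod r (p.length : Int)) 0) 40 hmem
  simp only [Function.comp_def] at this ⊢
  rw [this]
  -- now: countP L pred = cnt
  rw [hLdef, List.countP_map]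
  rw [PySem.List.enumerate_eq_map_pyRange answers 0, List.countP_map]
  rw [show PySem.List.len answers = ((answers.length : Nat) : Int) from by simp [pysem],
      PySem.List.pyRange_zero_natCast, List.countP_map]
  simp only [Function.comp_def]
  have hc : ∀ i ∈ List.range answers.length,
      (decide (PySem.List.pyGetD answers ((i : Nat) : Int) 0
          = PySem.List.pyGetD p (PySem.Int.mod (PySem.Int.mod ((i : Nat) : Int) 40) (p.length : Int)) 0) = true
        ↔ decide (answers.getD i 0 = p.getD (i % p.length) 0) = true) := by
    intro i hi
    have e1 : PySem.List.pyGetD answers (i : Int) 0 = answers.getD i 0 := PySem.List.pyGetD_natCast answers i 0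
    have e2 : PySem.Int.mod (i : Int) 40 = ((i % 40 : Nat) : Int) := by
      rw [show (40 : Int) = ((40 : Nat) : Int) from rfl, PySem.Int.mod_natCast]
    have e3 : PySem.Int.mod ((i % 40 : Nat) : Int) (p.length : Int) = ((i % p.length : Nat) : Int) := by
      rw [PySem.Int.mod_natCast, Nat.mod_mod_of_dvd i hdvd]
    have e4 : PySem.List.pyGetD p ((i % p.length : Nat) : Int) 0 = p.getD (i % p.length) 0 :=
      PySem.List.pyGetD_natCast p (i % p.length) 0
    simp only [e1, e2, e3, e4]
  rw [List.countP_congr hc]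
  rfl

theorem countP_getD_map (answers pat : List Int) (l : Nat) (hl : pat.length = l) :
    (List.range answers.length).countP
      (fun i => decide (answers.getD i 0
        = ((List.range answers.length).map (fun i => pat.getD (i % l) 0)).getD i 0))
      = cnt answers pat := by
  apply List.countP_congr
  intro i hi
  have hi2 : i < answers.length := List.mem_range.mp hi
  subst hl
  simp [List.getD_eq_getElem?_getD, hi2]

-- A's count fold yields the three scores
theorem counts_eq (answers : List Int) :
    (List.range answers.length).foldl (fun (c : Int × Int × Int) i =>
      ( if answers.getD i 0 = ((List.range answers.length).map (fun i => pat1.getD (i % 5) 0)).getD i 0 then c.1 + 1 else c.1,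
        if answers.getD i 0 = ((List.range answers.length).map (fun i => pat2.getD (i % 8) 0)).getD i 0 then c.2.1 + 1 else c.2.1,
        if answers.getD i 0 = ((List.range answers.length).map (fun i => pat3.getD (i % 10) 0)).getD i 0 then c.2.2 + 1 else c.2.2)) (0, 0, 0)
    = ((cnt answers pat1 : Int), (cnt answers pat2 : Int), (cnt answers pat3 : Int)) := by
  rw [PySem.List.foldl_prod_mk
      (f := fun (acc : Int) i => if answers.getD i 0 = ((List.range answers.length).map (fun i => pat1.getD (i % 5) 0)).getD i 0 then acc + 1 else acc)
      (g := fun (c : Int × Int) i =>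
        ( if answers.getD i 0 = ((List.range answers.length).map (fun i => pat2.getD (i % 8) 0)).getD i 0 then c.1 + 1 else c.1,
          if answers.getD i 0 = ((List.range answers.length).map (fun i => pat3.getD (i % 10) 0)).getD i 0 then c.2 + 1 else c.2))]
  rw [PySem.List.foldl_prod_mk
      (f := fun (acc : Int) i => if answers.getD i 0 = ((List.range answers.length).map (fun i => pat2.getD (i % 8) 0)).getD i 0 then acc + 1 else acc)
      (g := fun (acc : Int) i => if answers.getD i 0 = ((List.range answers.length).map (fun i => pat3.getD (i % 10) 0)).getD i 0 then acc + 1 else acc)]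
  rw [PySem.List.foldl_ite_add_one, PySem.List.foldl_ite_add_one, PySem.List.foldl_ite_add_one]
  rw [countP_getD_map answers pat1 5 rfl, countP_getD_map answers pat2 8 rfl,
      countP_getD_map answers pat3 10 rfl]
  norm_num

-- the tie-breaking cascade is the argmax filter
theorem cascade_eq_maxfilter (c1 c2 c3 : Int) :
    (if c1 > c2 ∧ c1 > c3 then [1]
     else if c2 > c1 ∧ c2 > c3 then [2]
     else if c3 > c1 ∧ c3 > c2 then [3]
     else if c1 = c2 then (if c1 > c3 then [1, 2] else [1, 2, 3])
     else if c1 = c3 then (if c1 > c2 then [1, 3] else [1, 2, 3])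
     else if c2 = c3 then (if c2 > c1 then [2, 3] else [1, 2, 3])
     else ([1, 2, 3] : List Int)) =
    (if c1 = max (max c1 c2) c3 then [1] else []) ++
      (if c2 = max (max c1 c2) c3 then [2] else []) ++
      (if c3 = max (max c1 c2) c3 then [3] else []) := by
  have h1 : c1 ≤ max (max c1 c2) c3 := le_trans (le_max_left _ _) (le_max_left _ _)
  have h2 : c2 ≤ max (max c1 c2) c3 := le_trans (le_max_right _ _) (le_max_left _ _)
  have h3 : c3 ≤ max (max c1 c2) c3 := le_max_right _ _
  have hm : max (max c1 c2) c3 = c1 ∨ max (max c1 c2) c3 = c2 ∨ max (max c1 c2) c3 = c3 := by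
    rcases max_choice (max c1 c2) c3 with h | h
    · rcases max_choice c1 c2 with h2 | h2
      · exact Or.inl (h.trans h2)
      · exact Or.inr (Or.inl (h.trans h2))
    · exact Or.inr (Or.inr h)
  split_ifs <;> first | rfl | omega

-- ===== VERDICT (by name: the statement is the Claim_ definition above) =====
theorem solution_spec : Claim_equal_solution := by
  intro answers _
  show solution answers = solution_alt answers
  simp only [solution, solution_alt]
  rw [no1_eq, no2_eq, no3_eq, counts_eq]
  simp only [List.map_cons, List.map_nil,
    show ([1, 2, 3, 4, 5] : List Int) = pat1 from rfl,
    show ([2, 1, 2, 3, 2, 4, 2, 5] : List Int) = pat2 from rfl,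
    show ([3, 3, 1, 1, 2, 2, 4, 4, 5, 5] : List Int) = pat3 from rfl]
  rw [score_eq answers pat1 (by norm_num [pat1]),
      score_eq answers pat2 (by norm_num [pat2]),
      score_eq answers pat3 (by norm_num [pat3])]
  rw [PySem.List.max?_id_cons]
  simp only [List.foldl_cons, List.foldl_nil, Option.getD_some]
  rw [show PySem.List.pyRange 0 3 1 = [0, 1, 2] from rfl]
  simp only [List.foldl_cons, List.foldl_nil]
  rw [show (forall a b c : Int, PySem.List.pyGetD [a, b, c] 0 0 = a) from fun a b c => rfl,
      show (forall a b c : Int, PySem.List.pyGetD [a, b, c] 1 0 = b) from fun a b c => rfl,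
      show (forall a b c : Int, PySem.List.pyGetD [a, b, c] 2 0 = c) from fun a b c => rfl]
  rw [cascade_eq_maxfilter]
  split_ifs <;> norm_num
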